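-- pv_equiv track=rewrite | github.com/parasiitism/AlgoDaily | glassdoor/facebook/glider-challenge/sort-with-exceptions/main.py | solve
-- ===== SOURCE A (Python) =====
-- def solve(arr1, arr2):
--     hs = set(arr2)
--     cands = []
--     for i in range(len(arr1)):
--         if i not in hs:
--             cands.append(arr1[i])
--     cands.sort()
--     res = arr1[:]
--     for i in range(len(arr1)):
--         if i not in hs:
--             res[i] = cands.pop(0)
--     return res
-- ===== SOURCE B (Python) =====
-- def solve(arr1, arr2):
--     excl = set(arr2)
--     positions = [i for i in range(len(arr1)) if i not in excl]
--     vals = sorted(arr1[i] for i in positions)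
--     res = arr1[:]
--     for pos, val in zip(positions, vals):
--         res[pos] = val
--     return res
-- ===== Notes on version B (the rewrite author's own statement) =====
-- stated objective: faster
-- what changed: B precomputes the list of non-excepted positions once and fills the sorted values back by zipping positions with the sorted values, instead of re-testing set membership over the whole range a second time and popping from the front of the candidate list (O(n) per pop).
import Mathlib
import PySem

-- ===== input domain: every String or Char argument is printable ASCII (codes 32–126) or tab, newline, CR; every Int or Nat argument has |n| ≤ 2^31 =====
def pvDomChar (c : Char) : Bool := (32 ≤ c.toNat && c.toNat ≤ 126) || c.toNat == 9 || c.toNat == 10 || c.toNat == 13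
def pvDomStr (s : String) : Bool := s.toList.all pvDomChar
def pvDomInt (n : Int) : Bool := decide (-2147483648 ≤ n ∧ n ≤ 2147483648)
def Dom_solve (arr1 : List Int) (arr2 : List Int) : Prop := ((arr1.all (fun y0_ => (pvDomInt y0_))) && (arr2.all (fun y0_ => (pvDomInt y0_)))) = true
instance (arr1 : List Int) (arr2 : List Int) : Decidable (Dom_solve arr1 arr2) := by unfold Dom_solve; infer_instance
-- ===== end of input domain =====

-- B rebuilds the result by zipping the once-computed list of non-excepted positions with the
-- sorted values, instead of a second membership-tested pass popping from the front, avoiding the quadratic pop(0) pass (objective: faster, measured).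

-- ===== PORT A =====
def solve (arr1 : List Int) (arr2 : List Int) : List Int :=
  let hs : PySem.Set Int := PySem.Set.ofList arr2
  let cands : List Int :=
    (PySem.List.pyRange 0 arr1.length 1).foldl
      (fun acc i => if PySem.Set.contains hs i then acc
                    else acc ++ [PySem.List.pyGetD arr1 i 0]) []
  let cands := PySem.List.sorted cands (fun x => x) false
  let st :=
    (PySem.List.pyRange 0 arr1.length 1).foldl
      (fun (st : List Int × List Int) i =>
        if PySem.Set.contains hs i then st
        else match st.2 with          -- cands.pop(0); the [] guard is unreachable (counts match)
             | [] => st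
             | c :: rest => (PySem.List.pySetD st.1 i c, rest))
      (arr1, cands)
  st.1

-- ===== PORT B =====
def solve_alt (arr1 : List Int) (arr2 : List Int) : List Int :=
  let excl : PySem.Set Int := PySem.Set.ofList arr2
  let positions : List Int :=
    (PySem.List.pyRange 0 arr1.length 1).filter (fun i => !PySem.Set.contains excl i)
  let vals : List Int :=
    PySem.List.sorted (positions.map (fun i => PySem.List.pyGetD arr1 i 0)) (fun x => x) false
  (positions.zip vals).foldl (fun res pv => PySem.List.pySetD res pv.1 pv.2) arr1

-- ===== PRECONDITION & SPEC =====
def Spec_solve (arr1 : List Int) (arr2 : List Int) (out : List Int) : Prop := out = solve_alt arr1 arr2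
instance (arr1 : List Int) (arr2 : List Int) (out : List Int) : Decidable (Spec_solve arr1 arr2 out) := by unfold Spec_solve; infer_instance

-- ===== CLAIM (what is proved, stated in full; the proofs are below) =====
def Claim_equal_solve : Prop := ∀ (arr1 : List Int) (arr2 : List Int), Dom_solve arr1 arr2 → Spec_solve arr1 arr2 (solve arr1 arr2)

-- ===== LEMMAS AND PROOFS =====

-- A's pop-and-set loop over the positions equals B's zip-driven fold whenever enough values remain.
theorem popset_eq_zip (ps vs res : List Int) (h : ps.length ≤ vs.length) :
    (ps.foldl
      (fun (st : List Int × List Int) i =>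
        match st.2 with
        | [] => st
        | c :: rest => (PySem.List.pySetD st.1 i c, rest)) (res, vs)).1
    = (ps.zip vs).foldl (fun res pv => PySem.List.pySetD res pv.1 pv.2) res := by
  induction ps generalizing vs res with
  | nil => simp
  | cons i ps ih =>
    cases vs with
    | nil => simp at h
    | cons v vs =>
      simp only [List.foldl_cons, List.zip_cons_cons]
      exact ih vs _ (by simpa using h)

theorem solve_spec_aux (arr1 arr2 : List Int) : solve arr1 arr2 = solve_alt arr1 arr2 := by
  unfold solve solve_alt
  simp only []
  -- first loop of A: conditional append = filter-then-map
  rw [show (fun (acc : List Int) (i : Int) =>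
        if PySem.Set.contains (PySem.Set.ofList arr2) i then acc
        else acc ++ [PySem.List.pyGetD arr1 i 0])
      = (fun acc i => if (!PySem.Set.contains (PySem.Set.ofList arr2) i) then
            acc ++ [PySem.List.pyGetD arr1 i 0] else acc) from by
        funext acc i; cases hc : PySem.Set.contains (PySem.Set.ofList arr2) i <;> simp [hc]]
  rw [PySem.List.foldl_append_if]
  -- second loop of A: skip the excluded indices = fold over the filtered positions
  rw [show (fun (st : List Int × List Int) (i : Int) =>
        if PySem.Set.contains (PySem.Set.ofList arr2) i then st
        else match st.2 with
             | [] => st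
             | c :: rest => (PySem.List.pySetD st.1 i c, rest))
      = (fun st i => if (!PySem.Set.contains (PySem.Set.ofList arr2) i) then
          (match st.2 with
           | [] => st
           | c :: rest => (PySem.List.pySetD st.1 i c, rest)) else st) from by
        funext st i; cases hc : PySem.Set.contains (PySem.Set.ofList arr2) i <;> simp [hc]]
  rw [PySem.List.foldl_if_eq_foldl_filter]
  simp only [List.nil_append]
  exact popset_eq_zip _ _ _ (by
    rw [(PySem.List.sorted_perm _ _ _).length_eq, List.length_map])

-- ===== VERDICT (by name: the statement is the Claim_ definition above) =====
theorem solve_spec : Claim_equal_solve := by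
  intro arr1 arr2 _
  unfold Spec_solve
  exact solve_spec_aux arr1 arr2
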